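-- pv_equiv track=rewrite | github.com/EduardR02/PriceChecker | main.py | format_nicely
-- ===== SOURCE A (Python) =====
-- def format_nicely(s):
--     j = []
--     for v in s:
--         j.append("".join(v))
--     for v, s in enumerate(j):
--         k = ""
--         for b in s:
--             if b.isdigit():
--                 k += b
--             elif b == ",":
--                 j[v] = int(k)
--                 break
--         j[v] = int(k)
--     j.sort()
--     return j
-- ===== SOURCE B (Python) =====
-- def format_nicely(s):
--     out = []
--     for v in s:
--         text = "".join(v)
--         cut = text.find(",")
--         head = text if cut == -1 else text[:cut]
--         n = int("".join(ch for ch in head if ch.isdigit()))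
--         lo, hi = 0, len(out)
--         while lo < hi:
--             mid = (lo + hi) // 2
--             if out[mid] <= n:
--                 lo = mid + 1
--             else:
--                 hi = mid
--         out.insert(lo, n)
--     return out
-- ===== Notes on version B (the rewrite author's own statement) =====
-- stated objective: alternative
-- what changed: Replaces A's three staged passes (join all rows, enumerate-and-mutate with a break-on-comma char loop, final j.sort()) by a single online pass that keeps the output sorted at all times, inserting each value at the position found by a hand-rolled binary search (bisect-style insertion sort); the digits are taken from the prefix located with str.find(',') and a slice instead of a break loop.
import Mathlib
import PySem

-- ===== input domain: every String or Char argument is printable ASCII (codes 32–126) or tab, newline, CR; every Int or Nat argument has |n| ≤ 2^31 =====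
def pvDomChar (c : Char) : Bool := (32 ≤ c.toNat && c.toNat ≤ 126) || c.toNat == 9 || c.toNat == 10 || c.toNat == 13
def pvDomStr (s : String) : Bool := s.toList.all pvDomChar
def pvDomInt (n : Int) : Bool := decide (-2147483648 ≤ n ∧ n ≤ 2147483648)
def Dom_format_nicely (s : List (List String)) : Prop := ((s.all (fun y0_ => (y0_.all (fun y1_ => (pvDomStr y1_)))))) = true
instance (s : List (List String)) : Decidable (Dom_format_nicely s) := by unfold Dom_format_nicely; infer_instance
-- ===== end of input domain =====

-- B replaces A's three staged passes (join everything, enumerate-and-mutate with a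
-- break-on-comma char loop, final sort) by one online pass that keeps the output sorted,
-- inserting each value at the position found by a hand-rolled binary search (alternative).

-- ===== PORT A =====
-- inner loop of A: k = ""; for b in s: if b.isdigit(): k += b; elif b == ",": break
def fnDigitsA : List Char → List Char → List Char
  | [], k => k
  | b :: rest, k =>
    if PySem.Chars.isdigit b then fnDigitsA rest (k ++ [b])
    else if b = ',' then k            -- j[v] = int(k); break  (int(k) taken below)
    else fnDigitsA rest k

-- int(k) raises ValueError when k is empty; those inputs are excluded by Pre_ (.getD 0 there).
def format_nicely (s : List (List String)) : List Int :=
  let j := s.map (fun v => PySem.Str.join "" v)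
  -- second loop: j[v] = int(k); each index is written once and never re-read, so the
  -- enumerate-and-mutate pass is the map of the loop body over j
  let j2 := j.map (fun sv => (PySem.Int.ofChars? (fnDigitsA sv.toList [])).getD 0)
  PySem.List.sorted j2 (fun x => x) false

-- ===== PORT B =====
-- value of one row: text = "".join(v); cut = text.find(","); head = text or text[:cut];
-- n = int(digits of head)   (int('') raises ValueError; excluded by Pre_, .getD 0 there)
def fnValB (v : List String) : Int :=
  let text := (PySem.Str.join "" v).toList
  let cut := PySem.Chars.find text [',']
  let head := if cut = -1 then text else PySem.List.slice text none (some cut)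
  (PySem.Int.ofChars? (head.filter PySem.Chars.isdigit)).getD 0

-- while lo < hi: mid = (lo+hi)//2; if out[mid] <= n: lo = mid+1 else: hi = mid
def fnBisect (out : List Int) (n : Int) (lo hi : Nat) : Nat :=
  if lo < hi then
    if PySem.List.pyGetD out (((lo + hi) / 2 : Nat) : Int) 0 ≤ n then
      fnBisect out n ((lo + hi) / 2 + 1) hi
    else
      fnBisect out n lo ((lo + hi) / 2)
  else lo
termination_by hi - lo
decreasing_by all_goals omega

def format_nicely_alt (s : List (List String)) : List Int :=
  s.foldl (fun out v =>
    let n := fnValB v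
    PySem.List.insert out ((fnBisect out n 0 out.length : Nat) : Int) n) []

-- ===== PRECONDITION & SPEC =====
-- Pre_ excludes exactly the inputs on which A raises ValueError: a row whose joined string
-- has no digit before its first comma (int('') there).
def Pre_format_nicely (s : List (List String)) : Prop :=
  ∀ v ∈ s, (((PySem.Str.join "" v).toList.takeWhile (fun c => c != ',')).any PySem.Chars.isdigit) = true
instance (s : List (List String)) : Decidable (Pre_format_nicely s) := by unfold Pre_format_nicely; infer_instance

def pvWitness_format_nicely : List (List String) := [["1", "a"], ["$2,", "99"]]

def Spec_format_nicely (s : List (List String)) (out : List Int) : Prop := out = format_nicely_alt s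
instance (s : List (List String)) (out : List Int) : Decidable (Spec_format_nicely s out) := by unfold Spec_format_nicely; infer_instance

-- ===== CLAIM (what is proved, stated in full; the proofs are below) =====
def Claim_equal_format_nicely : Prop := ∀ (s : List (List String)), Dom_format_nicely s → Pre_format_nicely s → Spec_format_nicely s (format_nicely s)

-- ===== LEMMAS AND PROOFS =====

-- A's inner loop collects exactly the digit characters before the first comma
lemma fnDigitsA_eq (cs : List Char) : ∀ k, fnDigitsA cs k =
    k ++ (cs.takeWhile (fun c => c != ',')).filter PySem.Chars.isdigit := by
  induction cs with
  | nil => intro k; simp [fnDigitsA]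
  | cons b rest ih =>
    intro k
    by_cases hd : PySem.Chars.isdigit b = true
    · have hb : (b != ',') = true := by
        simp only [bne_iff_ne]; intro hcc; subst hcc; exact absurd hd (by decide)
      simp [fnDigitsA, hd, List.takeWhile, hb, ih]
    · by_cases hc : b = ','
      · subst hc
        simp [fnDigitsA, List.takeWhile, (by decide : PySem.Chars.isdigit ',' = false)]
      · have hb : (b != ',') = true := by simp [hc]
        simp [fnDigitsA, hd, hc, List.takeWhile, hb, ih]

-- take up to the first comma IS takeWhile (≠ ',')
lemma takeWhile_eq_take_of_stop (l : List Char) : ∀ (k : Nat) (hk : k < l.length),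
    (∀ i (h : i < l.length), i < k → l[i] ≠ ',') → l[k] = ',' →
    l.takeWhile (fun c => c != ',') = l.take k := by
  induction l with
  | nil => intro k hk _ _; simp at hk
  | cons c rest ih =>
    intro k hk hbef hstop
    match k with
    | 0 =>
      simp at hstop; subst hstop
      simp [List.takeWhile]
    | k + 1 =>
      have hc : c ≠ ',' := hbef 0 (by simp) (by omega)
      have hb : (c != ',') = true := by simp [hc]
      simp only [List.takeWhile, hb, List.take_succ_cons, List.cons.injEq, true_and]
      exact ih k (by simpa using hk)
        (fun i h hik => by
          have := hbef (i + 1) (by simp; omega) (by omega)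
          simpa using this)
        (by simpa using hstop)

lemma takeWhile_eq_self_of_not_mem (l : List Char) (h : ',' ∉ l) :
    l.takeWhile (fun c => c != ',') = l := by
  induction l with
  | nil => rfl
  | cons c rest ih =>
    have hc : c ≠ ',' := by intro hc; exact h (by simp [hc])
    have hb : (c != ',') = true := by simp [hc]
    simp only [List.takeWhile, hb]
    exact congrArg (c :: ·) (ih (fun hm => h (by simp [hm])))

lemma singleton_infix_iff (c : Char) (l : List Char) : [c] <:+: l ↔ c ∈ l := by
  constructor
  · rintro ⟨s, t, rfl⟩; simp
  · intro hm
    obtain ⟨s, t, rfl⟩ := List.append_of_mem hm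
    exact ⟨s, t, by simp⟩

-- B's head (find + slice) is takeWhile (≠ ',')
lemma headB_eq (text : List Char) :
    (if PySem.Chars.find text [','] = -1 then text
     else PySem.List.slice text none (some (PySem.Chars.find text [',']))) =
    text.takeWhile (fun c => c != ',') := by
  by_cases h : PySem.Chars.find text [','] = -1
  · rw [if_pos h]
    have hnm : ',' ∉ text := by
      have := (PySem.Chars.find_eq_neg_one_iff text [',']).mp h
      intro hm; exact this ((singleton_infix_iff ',' text).mpr hm)
    exact (takeWhile_eq_self_of_not_mem text hnm).symm
  · rw [if_neg h]
    have h0 : PySem.Chars.findFrom text [','] ((0 : Nat) : Int) ≠ -1 := by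
      rw [(by norm_num : ((0 : Nat) : Int) = 0), PySem.Chars.findFrom_zero]; exact h
    obtain ⟨hge, hpre, hmin⟩ :=
      PySem.Chars.findFrom_natCast_spec text [','] 0 (Nat.zero_le _) h0
    rw [(by norm_num : ((0 : Nat) : Int) = 0), PySem.Chars.findFrom_zero] at hge hpre hmin
    set f := PySem.Chars.find text [','] with hf
    have hk : f.toNat < text.length := by
      rcases (List.cons_prefix_iff.mp hpre) with ⟨l', hl', -⟩
      have : (List.drop f.toNat text).length > 0 := by rw [hl']; simp
      simp at this; omega
    have hstop : text[f.toNat]'hk = ',' := by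
      rcases (List.cons_prefix_iff.mp hpre) with ⟨l', hl', -⟩
      have hh : (List.drop f.toNat text).head? = some ',' := by rw [hl']; rfl
      rw [List.head?_drop] at hh
      have := List.getElem?_eq_getElem (l := text) (i := f.toNat) hk
      rw [this] at hh
      exact Option.some.inj hh
    have hbef : ∀ i (h2 : i < text.length), i < f.toNat → text[i] ≠ ',' := by
      intro i h2 hif hcomma
      refine hmin i (Nat.zero_le _) hif ((List.cons_prefix_iff).mpr
        ⟨(List.drop i text).tail, ?_, by simp⟩)
      refine (List.cons_head?_tail ?_).symm
      rw [List.head?_drop, List.getElem?_eq_getElem (l := text) (i := i) h2, hcomma]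
      rfl
    rw [PySem.List.slice_to _ hge,
      takeWhile_eq_take_of_stop text f.toNat hk hbef hstop]

-- the two row values agree
lemma valB_eq (v : List String) :
    fnValB v = (PySem.Int.ofChars? (fnDigitsA (PySem.Str.join "" v).toList [])).getD 0 := by
  show (PySem.Int.ofChars?
      ((if PySem.Chars.find (PySem.Str.join "" v).toList [','] = -1
        then (PySem.Str.join "" v).toList
        else PySem.List.slice (PySem.Str.join "" v).toList none
          (some (PySem.Chars.find (PySem.Str.join "" v).toList [',']))).filter
        PySem.Chars.isdigit)).getD 0 = _
  rw [headB_eq, fnDigitsA_eq, List.nil_append]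

-- ---- binary-search insertion = PySem's stable insertBy ----

lemma takeWhile_eq_take_len {α : Type} (p : α → Bool) (l : List α) :
    l.takeWhile p = l.take (l.takeWhile p).length := by
  induction l with
  | nil => rfl
  | cons c rest ih =>
    by_cases h : p c
    · simp [List.takeWhile, h, ih.symm]
    · simp [List.takeWhile, h]

lemma dropWhile_eq_drop_len {α : Type} (p : α → Bool) (l : List α) :
    l.dropWhile p = l.drop (l.takeWhile p).length := by
  induction l with
  | nil => rfl
  | cons c rest ih =>
    by_cases h : p c
    · simp [List.takeWhile, List.dropWhile, h, ih]
    · simp [List.takeWhile, List.dropWhile, h]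

lemma len_takeWhile_le {α : Type} (p : α → Bool) (l : List α) :
    (l.takeWhile p).length ≤ l.length :=
  (List.takeWhile_sublist p).length_le

lemma pred_of_lt_len_takeWhile {α : Type} (p : α → Bool) (l : List α) (i : Nat)
    (hi : i < l.length) (h : i < (l.takeWhile p).length) : p l[i] = true := by
  have hget : (l.takeWhile p)[i]'h = l[i] := (List.takeWhile_prefix p).getElem h
  exact hget ▸ List.mem_takeWhile_imp (List.getElem_mem _)

lemma pred_at_len_takeWhile {α : Type} (p : α → Bool) (l : List α)
    (h : (l.takeWhile p).length < l.length) : p (l[(l.takeWhile p).length]'h) = false := by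
  induction l with
  | nil => simp at h
  | cons c rest ih =>
    by_cases hc : p c
    · simp only [List.takeWhile, hc, List.length_cons] at h ⊢
      simpa using ih (by simpa using h)
    · simp [List.takeWhile, hc]

-- characterisation of the insertion point on a sorted list
lemma le_iff_lt_tlen (acc : List Int) (n : Int) (hs : acc.Pairwise (· ≤ ·))
    (i : Nat) (hi : i < acc.length) :
    (acc[i] ≤ n ↔ i < (acc.takeWhile (fun y => !decide (n < y))).length) := by
  constructor
  · intro hle
    by_contra hnot
    have ht : (acc.takeWhile (fun y => !decide (n < y))).length < acc.length := by omega
    have hstop := pred_at_len_takeWhile (fun y => !decide (n < y)) acc ht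
    simp only [Bool.not_eq_false', decide_eq_true_eq] at hstop
    rcases Nat.lt_or_ge (acc.takeWhile (fun y => !decide (n < y))).length i with hlt | hge
    · have := List.pairwise_iff_getElem.mp hs _ i ht hi hlt
      omega
    · have : i = (acc.takeWhile (fun y => !decide (n < y))).length := by omega
      subst this; omega
  · intro hlt
    have := pred_of_lt_len_takeWhile (fun y => !decide (n < y)) acc i hi hlt
    have h2 : ¬ n < acc[i] := by simpa using this
    omega

lemma fnBisect_eq (acc : List Int) (n : Int) (hs : acc.Pairwise (· ≤ ·)) :
    ∀ (d lo hi : Nat), hi - lo ≤ d →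
    lo ≤ (acc.takeWhile (fun y => !decide (n < y))).length →
    (acc.takeWhile (fun y => !decide (n < y))).length ≤ hi → hi ≤ acc.length →
    fnBisect acc n lo hi = (acc.takeWhile (fun y => !decide (n < y))).length := by
  intro d
  induction d with
  | zero =>
    intro lo hi hd h1 h2 h3
    have : lo = hi := by omega
    subst this
    rw [fnBisect]
    simp; omega
  | succ d ih =>
    intro lo hi hd h1 h2 h3
    by_cases hlh : lo < hi
    · have hmid : (lo + hi) / 2 < acc.length := by omega
      rw [fnBisect, if_pos hlh]
      have hgd : PySem.List.pyGetD acc (((lo + hi) / 2 : Nat) : Int) 0 =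
          acc[(lo + hi) / 2]'hmid := by
        rw [PySem.List.pyGetD_natCast]
        exact List.getD_eq_getElem _ _ hmid
      by_cases hle : acc[(lo + hi) / 2]'hmid ≤ n
      · rw [if_pos (by rw [hgd]; exact hle)]
        have := (le_iff_lt_tlen acc n hs _ hmid).mp hle
        exact ih ((lo + hi) / 2 + 1) hi (by omega) (by omega) h2 h3
      · rw [if_neg (by rw [hgd]; exact hle)]
        have : ¬ ((lo + hi) / 2 < (acc.takeWhile (fun y => !decide (n < y))).length) :=
          fun hc => hle ((le_iff_lt_tlen acc n hs _ hmid).mpr hc)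
        exact ih lo ((lo + hi) / 2) (by omega) h1 (by omega) (by omega)
    · have : lo = hi := by omega
      subst this
      rw [fnBisect]
      simp; omega

-- PySem's insertBy splits at the same point
lemma insertBy_decomp (n : Int) (acc : List Int) :
    PySem.List.insertBy (fun a b => decide (a < b)) n acc =
    acc.takeWhile (fun y => !decide (n < y)) ++ n :: acc.dropWhile (fun y => !decide (n < y)) := by
  induction acc with
  | nil => rfl
  | cons y ys ih =>
    by_cases h : decide (n < y) = true
    · simp [PySem.List.insertBy, List.takeWhile, List.dropWhile, h]
    · simp only [PySem.List.insertBy, h, if_false, Bool.false_eq_true, List.takeWhile,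
        List.dropWhile]
      simpa using ih

-- one step of B's loop, on a sorted accumulator, is insertBy
lemma bstep_eq (acc : List Int) (n : Int) (hs : acc.Pairwise (· ≤ ·)) :
    PySem.List.insert acc ((fnBisect acc n 0 acc.length : Nat) : Int) n =
    PySem.List.insertBy (fun a b => decide (a < b)) n acc := by
  have htl := len_takeWhile_le (fun y => !decide (n < y)) acc
  rw [fnBisect_eq acc n hs acc.length 0 acc.length (by omega) (by omega) htl le_rfl,
    PySem.List.insert_natCast _ _ _ htl, insertBy_decomp]
  rw [← takeWhile_eq_take_len, ← dropWhile_eq_drop_len]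

lemma dropWhile_head_pred_false {α : Type} (p : α → Bool) (l : List α) (h0 : α) (t0 : List α)
    (h : l.dropWhile p = h0 :: t0) : p h0 = false := by
  induction l with
  | nil => simp [List.dropWhile] at h
  | cons c rest ih =>
    by_cases hc : p c
    · rw [List.dropWhile_cons_of_pos hc] at h; exact ih h
    · rw [List.dropWhile_cons_of_neg hc] at h
      cases h; simpa using hc

-- insertBy keeps the accumulator sorted
lemma insertBy_pairwise (acc : List Int) (n : Int) (hs : acc.Pairwise (· ≤ ·)) :
    (PySem.List.insertBy (fun a b => decide (a < b)) n acc).Pairwise (· ≤ ·) := by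
  rw [insertBy_decomp]
  have hsplit : acc.takeWhile (fun y => !decide (n < y)) ++
      acc.dropWhile (fun y => !decide (n < y)) = acc := List.takeWhile_append_dropWhile
  have hs' : (acc.takeWhile (fun y => !decide (n < y)) ++
      acc.dropWhile (fun y => !decide (n < y))).Pairwise (· ≤ ·) := by rw [hsplit]; exact hs
  rw [List.pairwise_append] at hs'
  obtain ⟨htw, hdw, hcross⟩ := hs'
  rw [List.pairwise_append]
  refine ⟨htw, ?_, ?_⟩
  · rw [List.pairwise_cons]
    refine ⟨?_, hdw⟩
    intro b hb
    cases heq : acc.dropWhile (fun y => !decide (n < y)) with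
    | nil => rw [heq] at hb; simp at hb
    | cons h0 t0 =>
      have hph := dropWhile_head_pred_false _ _ _ _ heq
      rw [heq] at hb hdw
      have hnh : n < h0 := by simpa using hph
      rcases List.mem_cons.mp hb with rfl | hbt
      · omega
      · have := (List.pairwise_cons.mp hdw).1 b hbt
        omega
  · intro a ha b hb
    have han : a ≤ n := by
      have := List.mem_takeWhile_imp ha
      have h2 : ¬ n < a := by simpa using this
      omega
    rcases List.mem_cons.mp hb with rfl | hbt
    · exact han
    · refine le_trans han (le_of_lt ?_)
      cases heq : acc.dropWhile (fun y => !decide (n < y)) with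
      | nil => rw [heq] at hbt; simp at hbt
      | cons h0 t0 =>
        have hph := dropWhile_head_pred_false _ _ _ _ heq
        rw [heq] at hbt hdw
        have hnh : n < h0 := by simpa using hph
        rcases List.mem_cons.mp hbt with rfl | hbt'
        · exact hnh
        · exact lt_of_lt_of_le hnh ((List.pairwise_cons.mp hdw).1 b hbt')

-- B's whole loop is the insertBy fold over the row values
lemma loopB_eq (rows : List (List String)) : ∀ (acc : List Int), acc.Pairwise (· ≤ ·) →
    rows.foldl (fun out v =>
      let n := fnValB v
      PySem.List.insert out ((fnBisect out n 0 out.length : Nat) : Int) n) acc =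
    (rows.map fnValB).foldl
      (fun a x => PySem.List.insertBy (fun a b => decide (a < b)) x a) acc := by
  induction rows with
  | nil => intro acc _; rfl
  | cons v rest ih =>
    intro acc hs
    simp only [List.foldl_cons, List.map_cons]
    rw [bstep_eq acc (fnValB v) hs]
    exact ih _ (insertBy_pairwise acc (fnValB v) hs)

-- ===== VERDICT (by name: the statement is the Claim_ definition above) =====
theorem format_nicely_spec : Claim_equal_format_nicely := by
  intro s _ _
  unfold Spec_format_nicely format_nicely format_nicely_alt
  simp only [List.map_map]
  rw [loopB_eq s [] (by simp)]
  rw [PySem.List.sorted_eq_foldl_insertBy]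
  have hmap : List.map ((fun sv => (PySem.Int.ofChars? (fnDigitsA sv.toList [])).getD 0) ∘
      fun v => PySem.Str.join "" v) s = List.map fnValB s :=
    List.map_congr_left (fun v _ => (valB_eq v).symm)
  rw [hmap]
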